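-- pv_equiv track=rewrite | github.com/ammar-gohar/Maceer | exam_scheduler.py | find_same_day_conflicts
-- ===== SOURCE A (Python) =====
-- def find_same_day_conflicts(students_data, exam_schedule):
--     """
--     Return a dict of students who have 2+ exams on the same day:
--       { student_name: { day_int: [course1, course2, …], … }, … }
--     """
--     conflicts = {}
--     for stu, info in students_data.items():
--         day_map = {}
--         for course in info['courses']:
--             day = exam_schedule.get(course)
--             if day is None:
--                 continue
--             day_map.setdefault(day, []).append(course)
--         # keep only days with multiple courses
--         bad = {d: courses for d, courses in day_map.items() if len(courses) > 1}
--         if bad: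
--             conflicts[stu] = bad
--     return conflicts
-- ===== SOURCE B (Python) =====
-- def _day_groups(pairs):
--     """Group (day, course) pairs by day, recursively, in first-seen day order."""
--     if not pairs:
--         return []
--     d = pairs[0][0]
--     return [(d, [c for dd, c in pairs if dd == d])] + \
--         _day_groups([p for p in pairs if p[0] != d])
--
--
-- def _bad_days(courses, exam_schedule):
--     pairs = [(exam_schedule[c], c) for c in courses if c in exam_schedule]
--     return [(d, cs) for d, cs in _day_groups(pairs) if len(cs) > 1]
--
--
-- def find_same_day_conflicts(students_data, exam_schedule):
--     """
--     Return a dict of students who have 2+ exams on the same day: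
--       { student_name: { day_int: [course1, course2, ...], ... }, ... }
--     Recursive group-extraction over (day, course) pairs instead of a
--     dict-of-lists accumulator, assembled by a dict comprehension.
--     """
--     return {stu: dict(bad)
--             for stu, bad in ((s, _bad_days(i['courses'], exam_schedule))
--                              for s, i in students_data.items())
--             if bad}
-- ===== Notes on version B (the rewrite author's own statement) =====
-- stated objective: alternative
-- what changed: Replaces A's dict-of-lists accumulation (setdefault/append then filter by length) with a recursive group extraction over the student's (day, course) pairs (take the first day, collect its courses by a scan, recurse on the remaining pairs), assembled by a dict comprehension instead of an imperative conditional-insert loop.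
import Mathlib
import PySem

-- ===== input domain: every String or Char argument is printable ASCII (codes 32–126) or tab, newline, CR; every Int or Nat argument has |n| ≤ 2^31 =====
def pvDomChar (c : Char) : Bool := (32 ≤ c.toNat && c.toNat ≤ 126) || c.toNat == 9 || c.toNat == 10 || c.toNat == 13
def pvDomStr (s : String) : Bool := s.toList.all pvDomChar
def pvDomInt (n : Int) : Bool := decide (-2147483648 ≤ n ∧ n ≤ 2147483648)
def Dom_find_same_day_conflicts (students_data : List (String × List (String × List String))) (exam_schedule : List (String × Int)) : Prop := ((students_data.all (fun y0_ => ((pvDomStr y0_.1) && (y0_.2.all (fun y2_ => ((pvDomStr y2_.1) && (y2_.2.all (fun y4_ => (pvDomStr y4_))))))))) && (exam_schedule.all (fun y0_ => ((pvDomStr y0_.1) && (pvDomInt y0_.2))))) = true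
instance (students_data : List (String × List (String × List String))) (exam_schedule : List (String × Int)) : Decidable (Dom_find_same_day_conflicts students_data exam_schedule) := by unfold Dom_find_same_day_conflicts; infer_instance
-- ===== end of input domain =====

-- B groups a student's (day, course) pairs by recursive group extraction (take the first day,
-- collect its courses, recurse on the rest) instead of a dict-of-lists accumulator, and assembles
-- the result by a dict comprehension; alternative decomposition, not faster.

-- ===== PORT A =====
-- loop body of A's outer 'for stu, info in students_data.items()':
-- info['courses'] would raise KeyError when absent; Pre_ excludes that, getD is exact on Pre_.
def pvA_student (sched : PySem.Dict String Int) (info : PySem.Dict String (List String)) : List (Int × List String) :=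
  let courses := info.getD "courses" []
  let day_map := courses.foldl
    (fun dm c =>
      match sched.get? c with          -- day = exam_schedule.get(course); if day is None: continue
      | none => dm
      | some day => dm.modify day [] (· ++ [c]))   -- day_map.setdefault(day, []).append(course)
    PySem.Dict.empty
  day_map.items.filter (fun p => decide (1 < p.2.length))   -- bad = {d: cs ... if len(cs) > 1}

def find_same_day_conflicts (students_data : List (String × List (String × List String))) (exam_schedule : List (String × Int)) : List (String × List (Int × List String)) :=
  let sched : PySem.Dict String Int := PySem.Dict.mk exam_schedule
  (students_data.foldl
    (fun conflicts p =>
      let bad := pvA_student sched (PySem.Dict.mk p.2)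
      if bad ≠ [] then conflicts.insert p.1 bad else conflicts)   -- if bad: conflicts[stu] = bad
    PySem.Dict.empty).items

-- ===== PORT B =====
-- _day_groups(pairs): recursive group extraction in first-seen day order
def pvDayGroups : List (Int × String) → List (Int × List String)
  | [] => []
  | p :: rest =>
      (p.1, ((p :: rest).filter (fun q => q.1 == p.1)).map (·.2)) ::   -- [c for dd, c in pairs if dd == d]
        pvDayGroups ((p :: rest).filter (fun q => q.1 != p.1))        -- [p for p in pairs if p[0] != d]
  termination_by pairs => pairs.length
  decreasing_by
    simp only [List.filter_cons, bne_self_eq_false, List.length_cons]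
    exact Nat.lt_succ_of_le (List.length_filter_le _ _)

-- _bad_days(courses, exam_schedule)
def pvBadDays (sched : PySem.Dict String Int) (courses : List String) : List (Int × List String) :=
  let pairs := courses.filterMap (fun c => (sched.get? c).map (fun d => (d, c)))   -- [(exam_schedule[c], c) for c in courses if c in exam_schedule]
  (pvDayGroups pairs).filter (fun g => decide (1 < g.2.length))

def find_same_day_conflicts_alt (students_data : List (String × List (String × List String))) (exam_schedule : List (String × Int)) : List (String × List (Int × List String)) :=
  let sched : PySem.Dict String Int := PySem.Dict.mk exam_schedule
  (PySem.Dict.ofList                                                  -- the outer dict comprehension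
    ((students_data.map
        (fun p => (p.1, pvBadDays sched ((PySem.Dict.mk p.2).getD "courses" [])))).filter
      (fun q => decide (q.2 ≠ [])))).items

-- ===== PRECONDITION & SPEC =====
-- Pre_ excludes exactly the inputs where A raises KeyError: some student's info dict has no 'courses' key.
def Pre_find_same_day_conflicts (students_data : List (String × List (String × List String))) (_exam_schedule : List (String × Int)) : Prop :=
  students_data.all (fun p => p.2.any (fun q => q.1 == "courses")) = true
instance (students_data : List (String × List (String × List String))) (exam_schedule : List (String × Int)) : Decidable (Pre_find_same_day_conflicts students_data exam_schedule) := by unfold Pre_find_same_day_conflicts; infer_instance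

def pvWitness_find_same_day_conflicts : (List (String × List (String × List String))) × (List (String × Int)) :=
  ([("ann", [("courses", ["m", "p"])]), ("bob", [("courses", ["m"])])], [("m", 1), ("p", 1)])

def Spec_find_same_day_conflicts (students_data : List (String × List (String × List String))) (exam_schedule : List (String × Int)) (out : List (String × List (Int × List String))) : Prop := out = find_same_day_conflicts_alt students_data exam_schedule
instance (students_data : List (String × List (String × List String))) (exam_schedule : List (String × Int)) (out : List (String × List (Int × List String))) : Decidable (Spec_find_same_day_conflicts students_data exam_schedule out) := by unfold Spec_find_same_day_conflicts; infer_instance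

-- ===== CLAIM (what is proved, stated in full; the proofs are below) =====
def Claim_equal_find_same_day_conflicts : Prop := ∀ (students_data : List (String × List (String × List String))) (exam_schedule : List (String × Int)), Dom_find_same_day_conflicts students_data exam_schedule → Pre_find_same_day_conflicts students_data exam_schedule → Spec_find_same_day_conflicts students_data exam_schedule (find_same_day_conflicts students_data exam_schedule)

-- ===== LEMMAS AND PROOFS =====

-- (day, course) pairs of the scheduled courses, in course order
def pvPairs (sched : PySem.Dict String Int) (courses : List String) : List (Int × String) :=
  courses.filterMap (fun c => (sched.get? c).map (fun d => (d, c)))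

theorem pvPairs_cons (sched : PySem.Dict String Int) (c : String) (cs : List String) :
    pvPairs sched (c :: cs) =
      (match sched.get? c with
       | none => pvPairs sched cs
       | some d => (d, c) :: pvPairs sched cs) := by
  unfold pvPairs
  rw [List.filterMap_cons]
  cases sched.get? c <;> simp

-- A's skip-None fold equals the plain fold over the scheduled (day, course) pairs
theorem pv_fold_eq_pairs (sched : PySem.Dict String Int) :
    ∀ (courses : List String) (dm : PySem.Dict Int (List String)),
      courses.foldl
        (fun dm c =>
          match sched.get? c with
          | none => dm
          | some day => dm.modify day [] (· ++ [c])) dm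
      = (pvPairs sched courses).foldl (fun dm p => dm.modify p.1 [] (· ++ [p.2])) dm := by
  intro courses
  induction courses with
  | nil => intro dm; rfl
  | cons c cs ih =>
    intro dm
    rw [pvPairs_cons]
    cases h : sched.get? c <;> simp [h, ih]

-- set(xs minus x) = set(xs).discard x : first-seen dedup commutes with removing one value
theorem pv_ofList_filter (x : Int) (xs : List Int) :
    PySem.Set.ofList (xs.filter (fun y => y != x)) = (PySem.Set.ofList xs).discard x := by
  induction xs with
  | nil => rfl
  | cons a t ih =>
    by_cases h : a = x
    · subst h
      simp [PySem.Set.ofList_cons, PySem.Set.discard, List.filter_filter, ih]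
    · simp only [List.filter_cons, bne_iff_ne, ne_eq, h, not_false_eq_true, decide_true,
        if_true, PySem.Set.ofList_cons, ih, PySem.Set.discard, List.filter_filter]
      simp [h, Bool.and_comm]

-- B's recursive group extraction, characterised: one group per first-seen day, courses refiltered
theorem pvDayGroups_eq (pairs : List (Int × String)) :
    pvDayGroups pairs = (PySem.Set.ofList (pairs.map Prod.fst)).map
      (fun d => (d, (pairs.filter (fun q => q.1 == d)).map (·.2))) := by
  induction pairs using pvDayGroups.induct with
  | case1 => simp [pvDayGroups]
  | case2 p rest ih =>
    rw [pvDayGroups, ih]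
    have h1 : ((p :: rest).filter (fun q => q.1 != p.1)) = rest.filter (fun q => q.1 != p.1) := by
      rw [List.filter_cons]; simp
    have h2 : (rest.filter (fun q => q.1 != p.1)).map Prod.fst
        = (rest.map Prod.fst).filter (fun y => y != p.1) := by
      rw [List.filter_map]; rfl
    rw [h1, h2, pv_ofList_filter]
    conv_rhs => rw [List.map_cons, PySem.Set.ofList_cons, List.map_cons]
    congr 1
    apply List.map_congr_left
    intro d hd
    have hdne : (p.1 == d) = false := by
      have hmem := (List.mem_filter.mp hd).2
      simp only [Bool.not_eq_eq_eq_not, Bool.not_true, beq_eq_false_iff_ne, ne_eq] at hmem ⊢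
      exact fun h => hmem h.symm
    simp only [List.filter_filter, List.filter_cons, hdne]
    have hp : (fun (q : Int × String) => (q.1 == d) && (q.1 != p.1)) = fun q => q.1 == d := by
      funext q
      by_cases h : q.1 = d
      · subst h
        simp only [BEq.rfl, Bool.true_and, bne_iff_ne, ne_eq]
        intro h; rw [h] at hdne; simp at hdne
      · simp [h]
    rw [hp]
    simp

-- the per-student bodies agree
theorem pv_student_eq (sched : PySem.Dict String Int) (info : PySem.Dict String (List String)) :
    pvA_student sched info = pvBadDays sched (info.getD "courses" []) := by
  unfold pvA_student pvBadDays
  dsimp only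
  generalize info.getD "courses" [] = courses
  rw [pv_fold_eq_pairs]
  have hkeys : ((pvPairs sched courses).foldl (fun dm p => dm.modify p.1 [] (· ++ [p.2]))
      PySem.Dict.empty).keys = PySem.Set.ofList ((pvPairs sched courses).map Prod.fst) := by
    rw [PySem.Dict.keys_foldl_modify_key]
    simp [PySem.Dict.keys_empty, PySem.Set.update_nil_left]
  have hnod : ((pvPairs sched courses).foldl (fun dm p => dm.modify p.1 [] (· ++ [p.2]))
      PySem.Dict.empty).keys.Nodup := by
    rw [hkeys]; exact PySem.Set.nodup_ofList _
  have hgetD : ∀ d : Int, ((pvPairs sched courses).foldl (fun dm p => dm.modify p.1 [] (· ++ [p.2]))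
      PySem.Dict.empty).getD d [] = ((pvPairs sched courses).filter (fun q => q.1 == d)).map (·.2) := by
    intro d
    rw [PySem.Dict.getD_foldl_modify_append, PySem.Dict.getD_empty]
    simp
  rw [PySem.Dict.items_eq_map_keys _ hnod ([] : List String), hkeys]
  simp only [hgetD]
  rw [pvDayGroups_eq]
  rfl

-- ===== VERDICT (by name: the statement is the Claim_ definition above) =====
theorem find_same_day_conflicts_spec : Claim_equal_find_same_day_conflicts := by
  intro students_data exam_schedule _ _
  unfold Spec_find_same_day_conflicts find_same_day_conflicts find_same_day_conflicts_alt
  dsimp only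
  rw [List.filter_map]
  show _ = (List.foldl (fun (d : PySem.Dict String (List (Int × List String))) (q : String × List (Int × List String)) => d.insert q.1 q.2) PySem.Dict.empty _).items
  rw [List.foldl_map, List.foldl_filter]
  simp only [pv_student_eq, Function.comp, decide_eq_true_eq]
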